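-- pv_equiv track=rewrite | github.com/anujdivesh/pacific-tides-api | scripts/fill_country_name.py | rebuild_row_with_country_name
-- ===== SOURCE A (Python) =====
-- from typing import Any, Dict, List, Optional
--
-- def rebuild_row_with_country_name(row: Dict[str, Any], flag_code: Optional[str]) -> Dict[str, Any]:
--     # Insert `country_name` immediately after `display_name` for consistency.
--     new_row: Dict[str, Any] = {}
--     inserted = False
--
--     for k, v in row.items():
--         if k == "country_name":
--             continue
--         new_row[k] = v
--         if k == "display_name":
--             new_row["country_name"] = flag_code
--             inserted = True
--
--     if not inserted:
--         new_row["country_name"] = flag_code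
--
--     return new_row
-- ===== SOURCE B (Python) =====
-- def rebuild_row_with_country_name(row, flag_code):
--     # Different mechanism: copy the dict, drop any old country_name, append the new
--     # one at the END, then rotate every key that follows display_name to the end
--     # (dict move-to-end via pop/reinsert) so country_name lands right after it.
--     new_row = dict(row)
--     new_row.pop("country_name", None)
--     new_row["country_name"] = flag_code
--     if "display_name" in new_row:
--         keys = list(new_row)[:-1]
--         for k in keys[keys.index("display_name") + 1:]:
--             new_row[k] = new_row.pop(k)
--     return new_row
-- ===== Notes on version B (the rewrite author's own statement) =====
-- stated objective: alternative
-- what changed: B copies the dict, drops any old country_name, appends the new one at the END, and then rotates every key after display_name to the end via pop/reinsert (dict move-to-end), instead of A's single pass that rebuilds a fresh dict while threading an 'inserted' sentinel.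
import Mathlib
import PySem

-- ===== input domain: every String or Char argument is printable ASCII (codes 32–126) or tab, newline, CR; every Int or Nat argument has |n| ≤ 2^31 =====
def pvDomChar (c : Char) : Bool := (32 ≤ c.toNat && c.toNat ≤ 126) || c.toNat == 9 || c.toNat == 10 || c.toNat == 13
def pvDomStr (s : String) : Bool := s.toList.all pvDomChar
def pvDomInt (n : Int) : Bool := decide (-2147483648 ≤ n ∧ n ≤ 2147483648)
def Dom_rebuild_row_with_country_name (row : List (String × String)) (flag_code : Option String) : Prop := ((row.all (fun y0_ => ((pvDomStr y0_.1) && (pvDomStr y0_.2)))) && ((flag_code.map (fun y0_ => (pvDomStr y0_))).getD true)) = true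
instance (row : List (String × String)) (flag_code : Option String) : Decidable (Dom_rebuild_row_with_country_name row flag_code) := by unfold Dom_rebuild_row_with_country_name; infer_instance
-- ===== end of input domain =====

-- B rebuilds the row by copying the dict, appending country_name at the end, and then
-- rotating the keys after display_name to the end via pop/reinsert (dict move-to-end),
-- instead of A's single pass with an `inserted` sentinel (objective: alternative).

-- ===== PORT A =====
-- the loop body of A, named so the proofs can speak about it
def pvAStep (fc : String) (st : PySem.Dict String String × Bool) (kv : String × String) :
    PySem.Dict String String × Bool :=
  if kv.1 == "country_name" then st
  else
    let d := st.1.insert kv.1 kv.2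
    if kv.1 == "display_name" then (d.insert "country_name" fc, true)
    else (d, st.2)

def rebuild_row_with_country_name (row : List (String × String)) (flag_code : Option String) : List (String × String) :=
  -- Pre_ requires flag_code ≠ none; getD "" is a totality guard (never read under Pre_)
  let fc := flag_code.getD ""
  let st := row.foldl (pvAStep fc) (PySem.Dict.empty, false)
  (if st.2 then st.1 else st.1.insert "country_name" fc).items

-- ===== PORT B =====
-- new_row[k] = new_row.pop(k) : pop the pair and re-append it (key is always present here;
-- the "" default of getD is a totality guard only)
def pvRot (d : PySem.Dict String String) (k : String) : PySem.Dict String String :=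
  let v := d.getD k ""
  (d.erase k).insert k v

def rebuild_row_with_country_name_alt (row : List (String × String)) (flag_code : Option String) : List (String × String) :=
  let fc := flag_code.getD ""                                      -- Pre_ requires flag_code ≠ none
  let new0 := (PySem.Dict.ofList row).erase "country_name"         -- dict(row); pop("country_name", None)
  let new1 := new0.insert "country_name" fc                        -- new_row["country_name"] = flag_code
  if new1.contains "display_name" then
    let keys := PySem.List.slice new1.keys none (some (-1))        -- list(new_row)[:-1]
    match PySem.List.index? keys "display_name" with
    | some i =>
      -- for k in keys[keys.index("display_name") + 1:]: new_row[k] = new_row.pop(k)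
      ((PySem.List.slice keys (some ((i : Int) + 1)) none).foldl pvRot new1).items
    | none => new1.items  -- unreachable: keys.index is guarded by the `in` check above
  else new1.items

-- ===== PRECONDITION & SPEC =====
-- Pre_ excludes (a) flag_code = None: A and B then both store None — which is no str — as the
-- country_name value, a dict the port's List (String × String) output type cannot represent;
-- and (b) association lists repeating a key, which never represent a Python dict argument.
def Pre_rebuild_row_with_country_name (row : List (String × String)) (flag_code : Option String) : Prop :=
  flag_code ≠ none ∧ (row.map Prod.fst).Nodup
instance (row : List (String × String)) (flag_code : Option String) : Decidable (Pre_rebuild_row_with_country_name row flag_code) := by unfold Pre_rebuild_row_with_country_name; infer_instance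

def pvWitness_rebuild_row_with_country_name : (List (String × String)) × Option String :=
  ([("id", "1"), ("display_name", "Fiji"), ("x", "y")], some "FJ")

def Spec_rebuild_row_with_country_name (row : List (String × String)) (flag_code : Option String) (out : List (String × String)) : Prop := out = rebuild_row_with_country_name_alt row flag_code
instance (row : List (String × String)) (flag_code : Option String) (out : List (String × String)) : Decidable (Spec_rebuild_row_with_country_name row flag_code out) := by unfold Spec_rebuild_row_with_country_name; infer_instance

-- ===== CLAIM (what is proved, stated in full; the proofs are below) =====
def Claim_equal_rebuild_row_with_country_name : Prop := ∀ (row : List (String × String)) (flag_code : Option String), Dom_rebuild_row_with_country_name row flag_code → Pre_rebuild_row_with_country_name row flag_code → Spec_rebuild_row_with_country_name row flag_code (rebuild_row_with_country_name row flag_code)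

-- ===== LEMMAS AND PROOFS =====

-- the splice A effectively performs: keep non-country pairs, put ("country_name", fc) right
-- after the display_name pair; the Bool is A's `inserted` flag
def pvIns (fc : String) : List (String × String) → List (String × String) × Bool
  | [] => ([], false)
  | kv :: rest =>
    if kv.1 = "display_name" then (kv :: ("country_name", fc) :: rest, true)
    else (kv :: (pvIns fc rest).1, (pvIns fc rest).2)

theorem pvMapFilter (l : List (String × String)) :
    (l.filter (fun kv => !(kv.1 == "country_name"))).map Prod.fst
      = (l.map Prod.fst).filter (fun k => !(k == "country_name")) := by
  induction l with
  | nil => rfl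
  | cons kv rest ih => by_cases h : kv.1 = "country_name" <;> simp [h, ih]

theorem pvA_foldl_filter (fc : String) (l : List (String × String)) (st : PySem.Dict String String × Bool) :
    l.foldl (pvAStep fc) st = (l.filter (fun kv => !(kv.1 == "country_name"))).foldl (pvAStep fc) st := by
  induction l generalizing st with
  | nil => rfl
  | cons kv rest ih =>
    by_cases h : kv.1 = "country_name"
    · simp [List.foldl_cons, h, pvAStep, ih]
    · simp [List.foldl_cons, h, ih]

theorem pvA_main (fc : String) (l : List (String × String)) (d : PySem.Dict String String) (ins : Bool)
    (hnd : (l.map Prod.fst).Nodup)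
    (hfresh : ∀ k ∈ l.map Prod.fst, d.contains k = false)
    (hcn : "country_name" ∉ l.map Prod.fst)
    (hinsf : ins = false → d.contains "country_name" = false)
    (hinst : ins = true → "display_name" ∉ l.map Prod.fst) :
    l.foldl (pvAStep fc) (d, ins) =
      (PySem.Dict.mk (d.items ++ (if ins then l else (pvIns fc l).1)), ins || (pvIns fc l).2) := by
  induction l generalizing d ins with
  | nil =>
    cases d; cases ins <;> simp [pvIns]
  | cons kv rest ih =>
    have hkv_cn : kv.1 ≠ "country_name" := by
      intro h; exact hcn (by simp [← h])
    have hkv_rest : kv.1 ∉ rest.map Prod.fst := (List.nodup_cons.mp (by simpa using hnd)).1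
    have hnd' : (rest.map Prod.fst).Nodup := (List.nodup_cons.mp (by simpa using hnd)).2
    have hcn' : "country_name" ∉ rest.map Prod.fst := fun h => hcn (by simp [h])
    have hdkv : d.contains kv.1 = false := hfresh kv.1 (by simp)
    by_cases hdisp : kv.1 = "display_name"
    · -- display_name step: ins must be false
      have hins : ins = false := by
        cases ins with
        | false => rfl
        | true => exact absurd (by simp [← hdisp]) (hinst rfl)
      subst hins
      have hdcn : d.contains "country_name" = false := hinsf rfl
      have step : pvAStep fc (d, false) kv = ((d.insert kv.1 kv.2).insert "country_name" fc, true) := by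
        simp [pvAStep, hdisp]
      have hfresh' : ∀ k ∈ rest.map Prod.fst,
          ((d.insert kv.1 kv.2).insert "country_name" fc).contains k = false := by
        intro k hk
        have hk_cn : k ≠ "country_name" := fun h => hcn' (h ▸ hk)
        have hk_kv : k ≠ kv.1 := fun h => hkv_rest (h ▸ hk)
        simp [PySem.Dict.contains_insert, hk_cn, hk_kv, hfresh k (by simp [hk])]
      have hdisp' : "display_name" ∉ rest.map Prod.fst := hdisp ▸ hkv_rest
      have ihres := ih ((d.insert kv.1 kv.2).insert "country_name" fc) true hnd' hfresh' hcn'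
        (by simp) (fun _ => hdisp')
      have hitems : ((d.insert kv.1 kv.2).insert "country_name" fc).items
          = d.items ++ [(kv.1, kv.2), ("country_name", fc)] := by
        have h1 : (d.insert kv.1 kv.2).items = d.items ++ [(kv.1, kv.2)] :=
          PySem.Dict.items_insert_of_not_contains d kv.2 hdkv
        have h2 : (d.insert kv.1 kv.2).contains "country_name" = false := by
          simp [PySem.Dict.contains_insert, (Ne.symm hkv_cn), hdcn]
        rw [PySem.Dict.items_insert_of_not_contains _ fc h2, h1]; simp
      rw [List.foldl_cons, step, ihres, hitems]
      simp [pvIns, hdisp]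
      exact Prod.ext_iff.mpr ⟨hdisp.symm, rfl⟩
    · -- ordinary key
      have step : pvAStep fc (d, ins) kv = (d.insert kv.1 kv.2, ins) := by
        simp [pvAStep, hkv_cn, hdisp]
      have hfresh' : ∀ k ∈ rest.map Prod.fst, (d.insert kv.1 kv.2).contains k = false := by
        intro k hk
        have hk_kv : k ≠ kv.1 := fun h => hkv_rest (h ▸ hk)
        simp [PySem.Dict.contains_insert, hk_kv, hfresh k (by simp [hk])]
      have hinsf' : ins = false → (d.insert kv.1 kv.2).contains "country_name" = false := by
        intro h
        simp [PySem.Dict.contains_insert, Ne.symm hkv_cn, hinsf h]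
      have hinst' : ins = true → "display_name" ∉ rest.map Prod.fst := by
        intro h hmem; exact hinst h (by simp [hmem])
      have ihres := ih (d.insert kv.1 kv.2) ins hnd' hfresh' hcn' hinsf' hinst'
      have h1 : (d.insert kv.1 kv.2).items = d.items ++ [(kv.1, kv.2)] :=
        PySem.Dict.items_insert_of_not_contains d kv.2 hdkv
      simp only [List.foldl_cons, step, ihres, h1, pvIns, hdisp, if_false]
      cases ins <;> simp

theorem pvIns_of_none (fc : String) (l : List (String × String))
    (h : "display_name" ∉ l.map Prod.fst) : pvIns fc l = (l, false) := by
  induction l with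
  | nil => rfl
  | cons kv rest ih =>
    have h1 : kv.1 ≠ "display_name" := fun hh => h (by simp [← hh])
    have h2 : "display_name" ∉ rest.map Prod.fst := fun hh => h (by simp [hh])
    simp [pvIns, h1, ih h2]

theorem pvIns_of_some (fc : String) (l : List (String × String)) (i : ℕ)
    (h : List.idxOf? "display_name" (l.map Prod.fst) = some i) :
    pvIns fc l = (l.take (i + 1) ++ ("country_name", fc) :: l.drop (i + 1), true) := by
  induction l generalizing i with
  | nil => simp [List.idxOf?] at h
  | cons kv rest ih =>
    by_cases h1 : kv.1 = "display_name"
    · have : i = 0 := by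
        simp [List.idxOf?, List.findIdx?_cons, h1] at h
        omega
      subst this
      simp [pvIns, h1]
    · rw [List.map_cons, List.idxOf?_cons] at h
      simp only [show (kv.1 == "display_name") = false by simp [h1], Bool.false_eq_true,
        if_false] at h
      obtain ⟨j, hj, hij⟩ := Option.map_eq_some_iff.mp h
      obtain rfl := hij.symm
      simp [pvIns, h1, ih j hj]

-- the characterization of A's result under Pre_
theorem pvA_char (row : List (String × String)) (fc : String)
    (hnd : (row.map Prod.fst).Nodup) :
    rebuild_row_with_country_name row (some fc) =
      (let l' := row.filter (fun kv => !(kv.1 == "country_name"))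
       if (pvIns fc l').2 then (pvIns fc l').1 else l' ++ [("country_name", fc)]) := by
  set l' := row.filter (fun kv => !(kv.1 == "country_name")) with hl'
  have hnd' : (l'.map Prod.fst).Nodup := by
    rw [hl', pvMapFilter]; exact hnd.filter _
  have hcn' : "country_name" ∉ l'.map Prod.fst := by
    rw [hl', pvMapFilter]; simp
  have hmain := pvA_main fc l' PySem.Dict.empty false hnd'
    (fun k _ => PySem.Dict.contains_empty k) hcn' (fun _ => PySem.Dict.contains_empty _)
    (by simp)
  simp only [rebuild_row_with_country_name, Option.getD_some]
  rw [pvA_foldl_filter, ← hl', hmain]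
  simp only [PySem.Dict.empty, Bool.false_or, List.nil_append, if_false, Bool.false_eq_true]
  by_cases hb : (pvIns fc l').2
  · simp [hb]
  · have hdn : "display_name" ∉ l'.map Prod.fst := by
      intro hmem
      rcases hh : List.idxOf? "display_name" (l'.map Prod.fst) with _ | i
      · exact absurd hmem (by simpa using List.idxOf?_eq_none_iff.mp hh)
      · exact hb (by rw [pvIns_of_some fc l' i hh])
    have hmk : (PySem.Dict.mk (pvIns fc l').1).contains "country_name" = false := by
      rw [pvIns_of_none fc l' hdn]
      rw [PySem.Dict.contains_eq_decide_mem_keys]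
      simp only [PySem.Dict.keys]
      simp [hcn']
    simp only [hb, if_false, Bool.false_eq_true]
    rw [PySem.Dict.items_insert_of_not_contains _ fc hmk]
    rw [pvIns_of_none fc l' hdn]

-- ===== B-side lemmas =====

-- one rotation on an explicit items list: pop the (unique) pair with the head key, re-append it
theorem pvRot_step (pre done : List (String × String)) (p : (String × String))
    (rest : List (String × String))
    (hnd : ((pre ++ p :: rest ++ done).map Prod.fst).Nodup) :
    pvRot (PySem.Dict.mk (pre ++ p :: rest ++ done)) p.1
      = PySem.Dict.mk (pre ++ rest ++ (done ++ [p])) := by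
  have hnd' := hnd
  simp only [List.map_append, List.map_cons, List.nodup_append, List.nodup_cons] at hnd'
  obtain ⟨⟨hpreN, ⟨hp_rest, hrN⟩, hdisj1⟩, hdN, hdisj2⟩ := hnd'
  have hp_pre : p.1 ∉ pre.map Prod.fst := fun h => hdisj1 p.1 h p.1 (by simp) rfl
  have hp_done : p.1 ∉ done.map Prod.fst := fun h => hdisj2 p.1 (by simp) p.1 h rfl
  have hne : ∀ q ∈ pre ++ rest ++ done, ¬(q.1 == p.1) = true := by
    intro q hq hb
    have hq1 : q.1 = p.1 := by simpa using hb
    rcases List.mem_append.mp hq with hq' | hq'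
    · rcases List.mem_append.mp hq' with hq'' | hq''
      · exact hp_pre (hq1 ▸ List.mem_map_of_mem hq'')
      · exact hp_rest (hq1 ▸ List.mem_map_of_mem hq'')
    · exact hp_done (hq1 ▸ List.mem_map_of_mem hq')
  have hget : (PySem.Dict.mk (pre ++ p :: rest ++ done)).getD p.1 "" = p.2 := by
    apply PySem.Dict.getD_of_mem_items (k := p.1) (v := p.2)
    · simp
    · simpa [PySem.Dict.keys] using hnd
  have herase : (PySem.Dict.mk (pre ++ p :: rest ++ done)).erase p.1
      = PySem.Dict.mk (pre ++ rest ++ done) := by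
    apply PySem.Dict.ext
    show (pre ++ p :: rest ++ done).filter (fun q => !(q.1 == p.1)) = pre ++ rest ++ done
    have e1 : pre.filter (fun q => !(q.1 == p.1)) = pre :=
      List.filter_eq_self.mpr (fun q hq => by simpa using hne q (by simp [hq]))
    have e2 : rest.filter (fun q => !(q.1 == p.1)) = rest :=
      List.filter_eq_self.mpr (fun q hq => by simpa using hne q (by simp [hq]))
    have e3 : done.filter (fun q => !(q.1 == p.1)) = done :=
      List.filter_eq_self.mpr (fun q hq => by simpa using hne q (by simp [hq]))
    rw [List.filter_append, List.filter_append, List.filter_cons_of_neg (by simp), e1, e2, e3]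
  have hcont : (PySem.Dict.mk (pre ++ rest ++ done)).contains p.1 = false := by
    show ((pre ++ rest ++ done).any fun q => q.1 == p.1) = false
    rw [List.any_eq_false]
    intro q hq
    simpa using hne q hq
  show ((PySem.Dict.mk (pre ++ p :: rest ++ done)).erase p.1).insert p.1
      ((PySem.Dict.mk (pre ++ p :: rest ++ done)).getD p.1 "") = _
  rw [hget, herase]
  apply PySem.Dict.ext
  rw [PySem.Dict.items_insert_of_not_contains _ _ hcont]
  simp

-- rotating every key of `rest` (in order) moves those pairs behind `done`
theorem pvRotFold (rest : List (String × String)) (pre done : List (String × String))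
    (hnd : ((pre ++ rest ++ done).map Prod.fst).Nodup) :
    (rest.map Prod.fst).foldl pvRot (PySem.Dict.mk (pre ++ rest ++ done))
      = PySem.Dict.mk (pre ++ done ++ rest) := by
  induction rest generalizing done with
  | nil => simp
  | cons p rest' ih =>
    rw [List.map_cons, List.foldl_cons, pvRot_step pre done p rest' (by simpa using hnd)]
    have h1 : (p :: (rest' ++ done)).Perm (rest' ++ done ++ [p]) :=
      (List.perm_append_singleton p (rest' ++ done)).symm
    have h2 : ((pre ++ p :: rest' ++ done).map Prod.fst).Perm
        ((pre ++ rest' ++ (done ++ [p])).map Prod.fst) := by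
      apply List.Perm.map
      simpa using List.Perm.append_left pre h1
    rw [ih (done ++ [p]) (h2.nodup_iff.mp hnd)]
    apply PySem.Dict.ext
    simp

-- ===== VERDICT (by name: the statement is the Claim_ definition above) =====
theorem rebuild_row_with_country_name_spec : Claim_equal_rebuild_row_with_country_name := by
  intro row flag_code _hdom hpre
  obtain ⟨hfc, hnd⟩ := hpre
  obtain ⟨fc, rfl⟩ := Option.ne_none_iff_exists'.mp hfc
  unfold Spec_rebuild_row_with_country_name
  rw [pvA_char row fc hnd]
  simp only [rebuild_row_with_country_name_alt, Option.getD_some]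
  set l' := row.filter (fun kv => !(kv.1 == "country_name")) with hl'
  have hnd' : (l'.map Prod.fst).Nodup := by
    rw [hl', pvMapFilter]; exact hnd.filter _
  have hcn' : "country_name" ∉ l'.map Prod.fst := by
    rw [hl', pvMapFilter]; simp
  -- dict(row) is row itself (fresh distinct keys)
  have hof : PySem.Dict.ofList row = PySem.Dict.mk row := by
    apply PySem.Dict.ext
    have := PySem.Dict.items_foldl_insert_fresh row Prod.fst Prod.snd PySem.Dict.empty
      (fun a _ => PySem.Dict.contains_empty a.1) hnd
    simpa [PySem.Dict.ofList, PySem.Dict.update] using this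
  -- popping country_name leaves exactly l'
  have herase : (PySem.Dict.ofList row).erase "country_name" = PySem.Dict.mk l' := by
    rw [hof]; apply PySem.Dict.ext
    show row.filter (fun q => !(q.1 == "country_name")) = l'
    rw [hl']
  have hcnf : (PySem.Dict.mk l').contains "country_name" = false := by
    rw [PySem.Dict.contains_eq_decide_mem_keys]
    simp only [PySem.Dict.keys]
    simp [hcn']
  have hnew1 : ((PySem.Dict.ofList row).erase "country_name").insert "country_name" fc
      = PySem.Dict.mk (l' ++ [("country_name", fc)]) := by
    rw [herase]; apply PySem.Dict.ext
    rw [PySem.Dict.items_insert_of_not_contains _ fc hcnf]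
  rw [hnew1]
  have hkeys : (PySem.Dict.mk (l' ++ [("country_name", fc)])).keys
      = l'.map Prod.fst ++ ["country_name"] := by
    simp [PySem.Dict.keys]
  have hslice : PySem.List.slice (PySem.Dict.mk (l' ++ [("country_name", fc)])).keys
      none (some (-1)) = l'.map Prod.fst := by
    rw [PySem.List.slice_to_neg_one, hkeys, List.dropLast_concat]
  have hcontain : (PySem.Dict.mk (l' ++ [("country_name", fc)])).contains "display_name"
      = decide ("display_name" ∈ l'.map Prod.fst) := by
    rw [PySem.Dict.contains_eq_decide_mem_keys, hkeys]
    simp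
  rcases hidx : List.idxOf? "display_name" (l'.map Prod.fst) with _ | i
  · -- display_name absent: country_name simply stays at the end, no rotation happens
    have hdn : "display_name" ∉ l'.map Prod.fst := by simpa [List.idxOf?_eq_none_iff] using hidx
    rw [pvIns_of_none fc l' hdn]
    rw [hcontain]
    simp [hdn]
  · -- display_name at index i: A splices; B rotates the keys after it to the end
    have hdn : "display_name" ∈ l'.map Prod.fst := by
      have := PySem.List.index?_isSome_iff (xs := l'.map Prod.fst) (v := "display_name")
      rw [PySem.List.index?_eq_idxOf?, hidx] at this
      simpa using this
    rw [pvIns_of_some fc l' i hidx]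
    rw [hcontain]
    simp only [hdn, decide_true, if_true, hslice]
    rw [PySem.List.index?_eq_idxOf?, hidx]
    have hfrom : PySem.List.slice (l'.map Prod.fst) (some ((i : Int) + 1)) none
        = (l'.drop (i + 1)).map Prod.fst := by
      have : ((i : Int) + 1) = ((i + 1 : Nat) : Int) := by push_cast; ring
      rw [this, PySem.List.slice_from_natCast, List.map_drop]
    show List.take (i + 1) l' ++ ("country_name", fc) :: List.drop (i + 1) l'
        = (List.foldl pvRot (PySem.Dict.mk (l' ++ [("country_name", fc)]))
            (PySem.List.slice (l'.map Prod.fst) (some ((i : Int) + 1)) none)).items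
    rw [hfrom]
    have hshape : l' ++ [("country_name", fc)]
        = l'.take (i + 1) ++ l'.drop (i + 1) ++ [("country_name", fc)] := by
      rw [List.take_append_drop]
    have hndrot : ((l'.take (i + 1) ++ l'.drop (i + 1) ++ [("country_name", fc)]).map
        Prod.fst).Nodup := by
      rw [List.take_append_drop]
      simp only [List.map_append, List.map_cons, List.map_nil]
      rw [List.nodup_append]
      refine ⟨hnd', by simp, ?_⟩
      intro a ha b hb
      simp only [List.mem_singleton] at hb
      subst hb
      exact fun h => hcn' (h ▸ ha)
    rw [hshape, pvRotFold (l'.drop (i + 1)) (l'.take (i + 1)) [("country_name", fc)] hndrot]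
    simp
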